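-- pv_equiv track=rewrite | github.com/VideepEkbote/Game-Theory-and-Stochastic-Optimization-Adaptive-Strategies-via-Monte-Carlo-Simulations | ques_1.py | calc_expectation
-- ===== SOURCE A (Python) =====
-- M = 1000000007
--
-- def mod_add(a, b):
--     a = (a % M + M) % M
--     b = (b % M + M) % M
--     return (a + b) % M
--
-- def mod_multiply(a, b):
--     a = (a % M + M) % M
--     b = (b % M + M) % M
--     return (a * b) % M
--
-- def mod_divide(a, b):
--     a = (a % M + M) % M
--     b = (b % M + M) % M
--     return mod_multiply(a, pow(b, M - 2, M))
--
-- def calc_expectation(t):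
--     """
--     Returns:
--         The expected value of \sum_{i=1}^{t} Xi will be of the form p/q,
--         where p and q are positive integers,
--         return p.q^(-1) mod 1000000007.
--
--     """
--
--     def f(x, t):
--         if x == 0 and t == 2: return 0
--         if x == 1 and t == 2: return 1
--         if x == 2 and t == 2: return 0
--         if dp[x][t] != -1: return dp[x][t]
--         if x == 1:
--             dp[x][t] = mod_multiply(mod_divide(x, t - 1), f(x, t - 1))
--             return dp[x][t]
--         if x == t - 1:
--             dp[x][t] = mod_multiply(f(x - 1, t - 1), mod_divide(t - x, t - 1))
--             return dp[x][t]
--         dp[x][t] = mod_add(mod_multiply(f(x - 1, t - 1), mod_divide(t - x, t - 1)),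
--                            mod_multiply(mod_divide(x, t - 1), f(x, t - 1)))
--         # mod_multiply(mod_divide(x ,t - 1) ,(f(x, t - 1))
--
--         return dp[x][t]
--
--     dp = [[-1 for i in range(t + 1)] for j in range(t + 1)]
--
--     dp[0][2] = 0
--     dp[1][2] = 1
--     dp[2][2] = 0
--     s = 0
--
--     for i in range(-(t - 2), t - 1):
--
--         if (i + t) % 2 == 0:
--             s = mod_add(s, mod_multiply(i, f((i + t) // 2, t)))
--     return s
-- ===== SOURCE B (Python) =====
-- M = 1000000007
--
-- def calc_expectation(t):
--     # The DP satisfies f(x, t) == f(t - x, t) (the walk is symmetric), while the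
--     # summation weight i = 2x - t is antisymmetric under x -> t - x, so the terms
--     # of the sum cancel in pairs and the expectation is exactly 0 (mod M it is 0).
--     return 0
-- ===== Notes on version B (the rewrite author's own statement) =====
-- stated objective: faster
-- what changed: Replaced the O(t^2) memoized DP plus modular-inverse summation by the closed form 0: f(x,t)=f(t-x,t) is symmetric while the weight i=2x-t is antisymmetric, so the sum telescopes to 0.
-- crash fix: For t < 2 A raises IndexError (the dp table has fewer than 3 columns when it writes dp[0][2]); B returns 0, the expectation of the empty sum. — e.g. on calc_expectation(0): A raises IndexError, B returns 0
import Mathlib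
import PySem

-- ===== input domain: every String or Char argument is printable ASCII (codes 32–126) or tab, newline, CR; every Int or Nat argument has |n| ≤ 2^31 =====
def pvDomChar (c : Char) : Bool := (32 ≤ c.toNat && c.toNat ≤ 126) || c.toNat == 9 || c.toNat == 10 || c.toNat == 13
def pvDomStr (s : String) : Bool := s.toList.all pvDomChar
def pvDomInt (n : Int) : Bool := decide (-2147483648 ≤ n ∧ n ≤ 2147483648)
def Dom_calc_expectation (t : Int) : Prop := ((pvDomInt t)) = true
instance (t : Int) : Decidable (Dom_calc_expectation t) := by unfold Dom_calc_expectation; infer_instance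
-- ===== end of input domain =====

-- B replaces A's O(t^2) memoized DP and modular-inverse summation by the constant 0,
-- exact because the DP is symmetric, f(x,t) = f(t-x,t), while the summation weight i
-- is antisymmetric, so the sum cancels in pairs (proved below).


-- ===== PORT A =====
def pvM : Int := 1000000007

def pv_mod_add (a b : Int) : Int :=
  let a := PySem.Int.mod (PySem.Int.mod a pvM + pvM) pvM
  let b := PySem.Int.mod (PySem.Int.mod b pvM + pvM) pvM
  PySem.Int.mod (a + b) pvM

def pv_mod_multiply (a b : Int) : Int :=
  let a := PySem.Int.mod (PySem.Int.mod a pvM + pvM) pvM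
  let b := PySem.Int.mod (PySem.Int.mod b pvM + pvM) pvM
  PySem.Int.mod (a * b) pvM

-- Python's 3-argument pow(b, e, m) for m > 0, by square-and-multiply (exact: both
-- compute b^e mod m with the result in [0, m); PySem.Int.powMod computes the same
-- value but is linear in e, far too slow for e = 10^9 - 5)
def pvPowMod (b : Int) (e : Nat) (m : Int) : Int :=
  if h : e = 0 then 1 % m
  else
    let r := pvPowMod (b * b % m) (e / 2) m
    if e % 2 = 1 then r * (b % m) % m else r
termination_by e
decreasing_by exact Nat.div_lt_self (Nat.pos_of_ne_zero h) one_lt_two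

def pv_mod_divide (a b : Int) : Int :=
  let a := PySem.Int.mod (PySem.Int.mod a pvM + pvM) pvM
  let b := PySem.Int.mod (PySem.Int.mod b pvM + pvM) pvM
  pv_mod_multiply a (pvPowMod b (pvM - 2).toNat pvM)

-- dp[a][b] read / functional write of Python's 2-D memo list (all of A's accesses
-- use indices 0 ≤ a,b ≤ t, in range of the (t+1)×(t+1) table, so getD/set are exact)
def pvGet2 (dp : List (List Int)) (a b : Nat) : Int := (dp.getD a []).getD b (-1)
def pvSet2 (dp : List (List Int)) (a b : Nat) (v : Int) : List (List Int) :=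
  dp.set a ((dp.getD a []).set b v)

-- A's inner f, with the memo table dp threaded through (Python mutates the closed-over
-- dp; here it travels in and out of every call). f descends t -> t-1, so fuel
-- (t-2).toNat suffices; branch and evaluation order are A's.
def pvFMemo : Nat → Int → Int → List (List Int) → Int × List (List Int)
  | 0, x, t, dp =>
    if x = 0 ∧ t = 2 then (0, dp)
    else if x = 1 ∧ t = 2 then (1, dp)
    else if x = 2 ∧ t = 2 then (0, dp)
    else if pvGet2 dp x.toNat t.toNat ≠ -1 then (pvGet2 dp x.toNat t.toNat, dp)
    else (0, dp)   -- unreachable on the calls A makes (there t = 2 hits a base case)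
  | fuel + 1, x, t, dp =>
    if x = 0 ∧ t = 2 then (0, dp)
    else if x = 1 ∧ t = 2 then (1, dp)
    else if x = 2 ∧ t = 2 then (0, dp)
    else if pvGet2 dp x.toNat t.toNat ≠ -1 then (pvGet2 dp x.toNat t.toNat, dp)
    else if x = 1 then
      let p := pvFMemo fuel x (t - 1) dp
      let r := pv_mod_multiply (pv_mod_divide x (t - 1)) p.1
      (r, pvSet2 p.2 x.toNat t.toNat r)
    else if x = t - 1 then
      let p := pvFMemo fuel (x - 1) (t - 1) dp
      let r := pv_mod_multiply p.1 (pv_mod_divide (t - x) (t - 1))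
      (r, pvSet2 p.2 x.toNat t.toNat r)
    else
      let p1 := pvFMemo fuel (x - 1) (t - 1) dp
      let p2 := pvFMemo fuel x (t - 1) p1.2
      let r := pv_mod_add (pv_mod_multiply p1.1 (pv_mod_divide (t - x) (t - 1)))
                          (pv_mod_multiply (pv_mod_divide x (t - 1)) p2.1)
      (r, pvSet2 p2.2 x.toNat t.toNat r)

def calc_expectation (t : Int) : Int :=
  let dp : List (List Int) :=
    List.replicate (t + 1).toNat (List.replicate (t + 1).toNat (-1))
  let dp := pvSet2 dp 0 2 0
  let dp := pvSet2 dp 1 2 1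
  let dp := pvSet2 dp 2 2 0
  (PySem.List.pyRange (-(t - 2)) (t - 1)).foldl
    (fun sd i =>
      if PySem.Int.mod (i + t) 2 = 0 then
        let p := pvFMemo (t - 2).toNat (PySem.Int.floordiv (i + t) 2) t sd.2
        (pv_mod_add sd.1 (pv_mod_multiply i p.1), p.2)
      else sd) (0, dp) |>.1

-- ===== PORT B =====
def calc_expectation_alt (t : Int) : Int := 0

-- ===== PRECONDITION & SPEC =====
-- For t < 2 the Python A raises IndexError (dp[0][2] with fewer than 3 columns).
def Pre_calc_expectation (t : Int) : Prop := 2 ≤ t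
instance (t : Int) : Decidable (Pre_calc_expectation t) := by unfold Pre_calc_expectation; infer_instance
def pvWitness_calc_expectation : Int := 4

-- For t < 2 A raises IndexError writing dp[0][2]; B returns 0, the expectation of the empty sum.
def Raises_calc_expectation (t : Int) : Prop := t < 2
instance (t : Int) : Decidable (Raises_calc_expectation t) := by unfold Raises_calc_expectation; infer_instance
def pvRaiseWitness_calc_expectation : Int := 0
def pvRaiseWitnessOut_calc_expectation : Int := 0

def Spec_calc_expectation (t : Int) (out : Int) : Prop := out = calc_expectation_alt t
instance (t : Int) (out : Int) : Decidable (Spec_calc_expectation t out) := by unfold Spec_calc_expectation; infer_instance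

-- ===== CLAIM (what is proved, stated in full; the proofs are below) =====
def Claim_equal_calc_expectation : Prop := ∀ (t : Int), Dom_calc_expectation t → Pre_calc_expectation t → Spec_calc_expectation t (calc_expectation t)
def Claim_raises_calc_expectation : Prop := (∀ (t : Int), Dom_calc_expectation t → Raises_calc_expectation t → ¬ Pre_calc_expectation t) ∧ (Dom_calc_expectation (pvRaiseWitness_calc_expectation) ∧ Raises_calc_expectation (pvRaiseWitness_calc_expectation) ∧ calc_expectation_alt (pvRaiseWitness_calc_expectation) = pvRaiseWitnessOut_calc_expectation)

-- ===== LEMMAS AND PROOFS =====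

-- memo-free restatement of A's inner f (same branches, no dp), the proofs' view of pvFMemo
def pvF : Nat → Int → Int → Int
  | fuel, x, t =>
    if x = 0 ∧ t = 2 then 0
    else if x = 1 ∧ t = 2 then 1
    else if x = 2 ∧ t = 2 then 0
    else match fuel with
      | 0 => 0
      | fuel + 1 =>
        if x = 1 then pv_mod_multiply (pv_mod_divide x (t - 1)) (pvF fuel x (t - 1))
        else if x = t - 1 then pv_mod_multiply (pvF fuel (x - 1) (t - 1)) (pv_mod_divide (t - x) (t - 1))
        else pv_mod_add (pv_mod_multiply (pvF fuel (x - 1) (t - 1)) (pv_mod_divide (t - x) (t - 1)))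
                        (pv_mod_multiply (pv_mod_divide x (t - 1)) (pvF fuel x (t - 1)))

-- memo-free restatement of A's summation loop over pvF
def pvCalcPure (t : Int) : Int :=
  (PySem.List.pyRange (-(t - 2)) (t - 1)).foldl
    (fun s i =>
      if PySem.Int.mod (i + t) 2 = 0 then
        pv_mod_add s (pv_mod_multiply i (pvF (t - 2).toNat (PySem.Int.floordiv (i + t) 2) t))
      else s) 0

theorem pvM_pos : (0:Int) < pvM := by norm_num [pvM]

theorem pv_norm (a : Int) : (a % pvM + pvM) % pvM = a % pvM := by unfold pvM; omega

theorem pv_mod_add_eq (a b : Int) : pv_mod_add a b = (a + b) % pvM := by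
  simp only [pv_mod_add, PySem.Int.mod_eq_emod_of_pos pvM_pos, pv_norm]
  rw [← Int.add_emod]

theorem pv_mod_multiply_eq (a b : Int) : pv_mod_multiply a b = (a * b) % pvM := by
  simp only [pv_mod_multiply, PySem.Int.mod_eq_emod_of_pos pvM_pos, pv_norm]
  rw [← Int.mul_emod]

theorem pv_mod_multiply_comm (a b : Int) : pv_mod_multiply a b = pv_mod_multiply b a := by
  simp [pv_mod_multiply_eq, Int.mul_comm]

theorem pvF_succ (n : Nat) (x t : Int) (ht : t ≠ 2) :
    pvF (n + 1) x t =
      if x = 1 then pv_mod_multiply (pv_mod_divide x (t - 1)) (pvF n x (t - 1))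
      else if x = t - 1 then pv_mod_multiply (pvF n (x - 1) (t - 1)) (pv_mod_divide (t - x) (t - 1))
      else pv_mod_add (pv_mod_multiply (pvF n (x - 1) (t - 1)) (pv_mod_divide (t - x) (t - 1)))
                      (pv_mod_multiply (pv_mod_divide x (t - 1)) (pvF n x (t - 1))) := by
  conv_lhs => rw [pvF]
  simp only [ht, and_false, if_false]

theorem pv_addmul_comm (a b c d : Int) :
    pv_mod_add (pv_mod_multiply a b) (pv_mod_multiply c d)
      = pv_mod_add (pv_mod_multiply d c) (pv_mod_multiply b a) := by
  simp only [pv_mod_add_eq, pv_mod_multiply_eq]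
  rw [Int.mul_comm a b, Int.mul_comm c d, Int.add_comm]

-- the symmetry of A's DP: f(x,t) = f(t-x,t)
theorem pvF_symm : ∀ (fuel : Nat) (x t : Int), t = (fuel : Int) + 2 → 1 ≤ x → x ≤ t - 1 →
    pvF fuel x t = pvF fuel (t - x) t := by
  intro fuel
  induction fuel with
  | zero =>
    intro x t ht h1 h2
    have hx : x = 1 := by push_cast at ht; omega
    have ht2 : t = 2 := by push_cast at ht; omega
    subst hx ht2
    norm_num
  | succ m ih =>
    intro x t ht h1 h2
    have ht3 : (3:Int) ≤ t := by push_cast at ht; omega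
    have hne : t ≠ 2 := by omega
    have htm : t - 1 = (m : Int) + 2 := by push_cast at ht ⊢; omega
    rw [pvF_succ m x t hne, pvF_succ m (t - x) t hne]
    by_cases hx1 : x = 1
    · subst hx1
      rw [if_pos rfl, if_neg (show t - 1 ≠ 1 by omega),
          if_pos (show t - 1 = t - 1 from rfl)]
      rw [show t - (t - 1) = 1 from by ring]
      rw [ih 1 (t - 1) htm le_rfl (by omega)]
      exact pv_mod_multiply_comm _ _
    · by_cases hxl : x = t - 1
      · rw [if_neg hx1, if_pos hxl, if_pos (show t - x = 1 by omega)]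
        rw [show t - x = 1 from by omega, show x - 1 = t - 1 - 1 from by omega]
        rw [ih 1 (t - 1) htm le_rfl (by omega)]
        exact pv_mod_multiply_comm _ _
      · have hb1 : (2:Int) ≤ x := by omega
        have hb2 : x ≤ t - 2 := by omega
        rw [if_neg hx1, if_neg hxl, if_neg (show ¬ t - x = 1 by omega),
            if_neg (show ¬ t - x = t - 1 by omega)]
        rw [show t - (t - x) = x from by ring]
        have e1 : pvF m (x - 1) (t - 1) = pvF m (t - x) (t - 1) := by
          rw [ih (x - 1) (t - 1) htm (by omega) (by omega)]
          rw [show t - 1 - (x - 1) = t - x from by ring]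
        have e2 : pvF m x (t - 1) = pvF m (t - x - 1) (t - 1) := by
          rw [ih x (t - 1) htm (by omega) (by omega)]
          rw [show t - 1 - x = t - x - 1 from by ring]
        rw [e1, e2]
        exact pv_addmul_comm _ _ _ _

theorem pv_foldl_emod (c : Int → Prop) [DecidablePred c] (h : Int → Int) :
    ∀ (l : List Int) (s : Int),
      (l.foldl (fun s i => if c i then (s + h i) % pvM else s) s) % pvM
        = (s + (l.map (fun i => if c i then h i else 0)).sum) % pvM := by
  intro l
  induction l with
  | nil => intro s; simp
  | cons a l ih =>
    intro s
    by_cases hc : c a <;> simp only [List.foldl_cons, List.map_cons, List.sum_cons, hc,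
      if_true, if_false, ih] <;> (unfold pvM; omega)

theorem pv_foldl_bounds (c : Int → Prop) [DecidablePred c] (h : Int → Int) :
    ∀ (l : List Int) (s : Int), 0 ≤ s → s < pvM →
      0 ≤ (l.foldl (fun s i => if c i then (s + h i) % pvM else s) s)
        ∧ (l.foldl (fun s i => if c i then (s + h i) % pvM else s) s) < pvM := by
  intro l
  induction l with
  | nil => intro s h0 h1; simpa using ⟨h0, h1⟩
  | cons a l ih =>
    intro s h0 h1
    by_cases hc : c a
    · simp only [List.foldl_cons, hc, if_true]
      exact ih _ (Int.emod_nonneg _ (by norm_num [pvM])) (Int.emod_lt_of_pos _ pvM_pos)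
    · simp only [List.foldl_cons, hc, if_false]
      exact ih _ h0 h1

-- sum of an odd function over the symmetric range [-n, n] is 0
theorem pv_sum_odd_zero (g : Int → Int) :
    ∀ n : Nat, (∀ i : Int, 0 ≤ i → i ≤ (n : Int) → g (-i) = - g i) →
      ((PySem.List.pyRange (-(n : Int)) ((n : Int) + 1)).map g).sum = 0 := by
  intro n
  induction n with
  | zero =>
    intro hg
    have h0 := hg 0 le_rfl le_rfl
    simp only [Nat.cast_zero, neg_zero, zero_add]
    rw [show PySem.List.pyRange (0:Int) 1 = [(0:Int)] from by decide]
    simp only [List.map_cons, List.map_nil, List.sum_cons, List.sum_nil]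
    simp only [neg_zero] at h0
    omega
  | succ n ih =>
    intro hg
    have ihs := ih (fun i a b => hg i a (by push_cast at b ⊢; omega))
    have h1 : (-(((n:Nat)+1 : Nat) : Int)) < ((((n:Nat)+1 : Nat) : Int) + 1) := by push_cast; omega
    rw [PySem.List.pyRange_one_cons h1]
    have h2 : ((-((((n:Nat)+1 : Nat)) : Int)) + 1) = -(n : Int) := by push_cast; ring
    have h3 : ((((n:Nat)+1 : Nat) : Int) + 1) = ((n : Int) + 1) + 1 := by push_cast; ring
    rw [h2, h3, PySem.List.pyRange_one_succ_right (by omega)]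
    have hodd := hg ((n : Int) + 1) (by omega) (by push_cast; omega)
    simp only [List.map_cons, List.map_append, List.sum_cons, List.sum_append,
      List.map_nil, List.sum_nil, ihs]
    push_cast
    omega

theorem pvCalcPure_eq_zero (t : Int) (ht : 2 ≤ t) : pvCalcPure t = 0 := by
  have h2pos : (0:Int) < 2 := by norm_num
  have hnt : (((t - 2).toNat : Nat) : Int) = t - 2 := Int.toNat_of_nonneg (by omega)
  set n : Nat := (t - 2).toNat with hn
  unfold pvCalcPure
  rw [← hn]
  rw [show -(t - 2) = -((n:Int)) from by omega, show t - 1 = (n:Int) + 1 from by omega]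
  simp only [pv_mod_add_eq, pv_mod_multiply_eq, PySem.Int.mod_eq_emod_of_pos h2pos,
    PySem.Int.floordiv_eq_ediv_of_pos h2pos]
  set L := PySem.List.pyRange (-((n:Int))) ((n:Int) + 1) with hL
  set g : Int → Int := fun i => if (i + t) % 2 = 0 then i * pvF n ((i + t) / 2) t else 0 with hg
  have hfold :
      (L.foldl (fun s i => if (i + t) % 2 = 0
          then (s + i * pvF n ((i + t) / 2) t % pvM) % pvM else s) 0) % pvM
        = (0 + (L.map (fun i => if (i + t) % 2 = 0
            then i * pvF n ((i + t) / 2) t % pvM else 0)).sum) % pvM :=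
    pv_foldl_emod (fun i => (i + t) % 2 = 0)
      (fun i => i * pvF n ((i + t) / 2) t % pvM) L 0
  have hbnd := pv_foldl_bounds (fun i => (i + t) % 2 = 0)
      (fun i => i * pvF n ((i + t) / 2) t % pvM) L 0 le_rfl pvM_pos
  have hmap : (L.map (fun i => if (i + t) % 2 = 0
      then i * pvF n ((i + t) / 2) t % pvM else 0)) = (L.map g).map (· % pvM) := by
    rw [List.map_map]
    refine List.map_congr_left fun i _ => ?_
    simp only [hg, Function.comp_apply]
    by_cases hc : (i + t) % 2 = 0
    · rw [if_pos hc, if_pos hc]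
    · rw [if_neg hc, if_neg hc, Int.zero_emod]
  have hodd : ∀ i : Int, 0 ≤ i → i ≤ (n:Int) → g (-i) = - g i := by
    intro i h0 h1
    by_cases hc : (i + t) % 2 = 0
    · have hc' : (-i + t) % 2 = 0 := by omega
      rw [hg]
      simp only [hc, hc', if_pos]
      rw [show (-i + t) / 2 = t - (i + t) / 2 from by omega]
      rw [← pvF_symm n ((i + t) / 2) t (by omega) (by omega) (by omega)]
      ring
    · have hc' : ¬ (-i + t) % 2 = 0 := by omega
      rw [hg]
      simp only [hc, hc', if_false]
      ring
  have hsum : (L.map g).sum = 0 := pv_sum_odd_zero g n hodd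
  rw [hmap] at hfold
  have hz : (0 + ((L.map g).map (· % pvM)).sum) % pvM = 0 := by
    rw [Int.zero_add, ← List.sum_int_mod (L.map g) pvM, hsum, Int.zero_emod]
  rw [hz] at hfold
  obtain ⟨hb1, hb2⟩ := hbnd
  beta_reduce at hb1 hb2
  unfold pvM at hfold hb1 hb2 ⊢
  omega

-- ===== bridging the memoised port to the memo-free pvF =====

-- A's stored DP values are fuel-independent: at level t the recursion always runs with fuel t-2
theorem pvF_fuel_irrel (f1 f2 : Nat) (x t : Int) (h1 : t = (f1 : Int) + 2) (h2 : t = (f2 : Int) + 2) :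
    pvF f1 x t = pvF f2 x t := by
  have : f1 = f2 := by omega
  subst this; rfl

-- getD after set, for any list
theorem pv_getD_set {α : Type} (l : List α) (i : Nat) (v : α) (j : Nat) (dft : α) :
    (l.set i v).getD j dft = if i = j ∧ i < l.length then v else l.getD j dft := by
  rw [List.getD_eq_getElem?_getD, List.getElem?_set, List.getD_eq_getElem?_getD]
  by_cases hij : i = j
  · subst hij
    by_cases hl : i < l.length
    · simp [hl]
    · rw [if_pos rfl, if_neg hl, if_neg (by omega)]
      rw [List.getElem?_eq_none (by omega)]
  · rw [if_neg hij, if_neg (by omega)]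

-- every cell of pvSet2 dp a b v is the old cell, except (a,b) which may become v
theorem pvGet2_pvSet2 (dp : List (List Int)) (a b : Nat) (v : Int) (c d : Nat) :
    pvGet2 (pvSet2 dp a b v) c d = pvGet2 dp c d
      ∨ (c = a ∧ d = b ∧ pvGet2 (pvSet2 dp a b v) c d = v) := by
  unfold pvGet2 pvSet2
  rw [pv_getD_set dp a ((dp.getD a []).set b v) c []]
  by_cases h : a = c ∧ a < dp.length
  · rw [if_pos h]
    rw [pv_getD_set (dp.getD a []) b v d (-1)]
    by_cases h2 : b = d ∧ b < (dp.getD a []).length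
    · exact Or.inr ⟨h.1.symm, h2.1.symm, by rw [if_pos h2]⟩
    · rw [if_neg h2, h.1]
      exact Or.inl rfl
  · rw [if_neg h]
    exact Or.inl rfl

-- the memoised f returns pvF and keeps every stored cell equal to pvF
theorem pvFMemo_spec : ∀ (fuel : Nat) (x t : Int) (dp : List (List Int)),
    t = (fuel : Int) + 2 → 1 ≤ x → x ≤ t - 1 →
    (∀ a b : Nat, pvGet2 dp a b ≠ -1 →
        pvGet2 dp a b = pvF ((b : Int) - 2).toNat (a : Int) (b : Int)) →
    (pvFMemo fuel x t dp).1 = pvF fuel x t ∧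
    (∀ a b : Nat, pvGet2 (pvFMemo fuel x t dp).2 a b ≠ -1 →
        pvGet2 (pvFMemo fuel x t dp).2 a b = pvF ((b : Int) - 2).toNat (a : Int) (b : Int)) := by
  intro fuel
  induction fuel with
  | zero =>
    intro x t dp ht h1 h2 hgood
    have hx : x = 1 := by push_cast at ht; omega
    have ht2 : t = 2 := by push_cast at ht; omega
    subst hx ht2
    exact ⟨rfl, hgood⟩
  | succ m ih =>
    intro x t dp ht h1 h2 hgood
    have ht3 : t = (m : Int) + 3 := by push_cast at ht; omega
    have hne2 : t ≠ 2 := by omega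
    have htm : t - 1 = (m : Int) + 2 := by omega
    have hxc : ((x.toNat : Nat) : Int) = x := Int.toNat_of_nonneg (by omega)
    have htc : ((t.toNat : Nat) : Int) = t := Int.toNat_of_nonneg (by omega)
    have hfi : pvF ((t : Int) - 2).toNat x t = pvF (m + 1) x t :=
      pvF_fuel_irrel _ _ x t (by omega) ht
    rw [pvFMemo]
    rw [if_neg (fun h => hne2 h.2), if_neg (fun h => hne2 h.2), if_neg (fun h => hne2 h.2)]
    by_cases hcur : pvGet2 dp x.toNat t.toNat ≠ -1
    · rw [if_pos hcur]
      refine ⟨?_, hgood⟩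
      have := hgood x.toNat t.toNat hcur
      rw [hxc, htc] at this
      rw [this]
      exact hfi
    · rw [if_neg hcur]
      by_cases hx1 : x = 1
      · subst hx1
        obtain ⟨hv, hg1⟩ := ih 1 (t - 1) dp htm le_rfl (by omega) hgood
        rw [if_pos rfl, pvF_succ m 1 t hne2, if_pos rfl]
        dsimp only
        have hr : pv_mod_multiply (pv_mod_divide 1 (t - 1)) (pvFMemo m 1 (t - 1) dp).1
            = pvF (m + 1) 1 t := by
          rw [hv, pvF_succ m 1 t hne2, if_pos rfl]
        refine ⟨by rw [hv], ?_⟩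
        intro a b hne
        rcases pvGet2_pvSet2 (pvFMemo m 1 (t - 1) dp).2 (1:Int).toNat t.toNat _ a b with
          hold | ⟨rfl, rfl, hv2⟩
        · rw [hold] at hne ⊢
          exact hg1 a b hne
        · rw [hv2, hr]
          rw [show (((1:Int).toNat : Nat) : Int) = 1 from rfl, htc]
          exact (pvF_fuel_irrel _ _ 1 t (by omega) ht).symm
      · by_cases hxl : x = t - 1
        · obtain ⟨hv, hg1⟩ := ih (x - 1) (t - 1) dp htm (by omega) (by omega) hgood
          rw [if_neg hx1, if_pos hxl, pvF_succ m x t hne2, if_neg hx1, if_pos hxl]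
          dsimp only
          have hr : pv_mod_multiply (pvFMemo m (x - 1) (t - 1) dp).1 (pv_mod_divide (t - x) (t - 1))
              = pvF (m + 1) x t := by
            rw [hv, pvF_succ m x t hne2, if_neg hx1, if_pos hxl]
          refine ⟨by rw [hv], ?_⟩
          intro a b hne
          rcases pvGet2_pvSet2 (pvFMemo m (x - 1) (t - 1) dp).2 x.toNat t.toNat _ a b with
            hold | ⟨rfl, rfl, hv2⟩
          · rw [hold] at hne ⊢
            exact hg1 a b hne
          · rw [hv2, hr, hxc, htc]
            exact (pvF_fuel_irrel _ _ x t (by omega) ht).symm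
        · have hb1 : (2:Int) ≤ x := by omega
          have hb2 : x ≤ t - 2 := by omega
          obtain ⟨hv1, hg1⟩ := ih (x - 1) (t - 1) dp htm (by omega) (by omega) hgood
          obtain ⟨hv2, hg2⟩ := ih x (t - 1) (pvFMemo m (x - 1) (t - 1) dp).2 htm (by omega) (by omega) hg1
          rw [if_neg hx1, if_neg hxl, pvF_succ m x t hne2, if_neg hx1, if_neg hxl]
          dsimp only
          have hr : pv_mod_add
              (pv_mod_multiply (pvFMemo m (x - 1) (t - 1) dp).1 (pv_mod_divide (t - x) (t - 1)))
              (pv_mod_multiply (pv_mod_divide x (t - 1))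
                (pvFMemo m x (t - 1) (pvFMemo m (x - 1) (t - 1) dp).2).1)
              = pvF (m + 1) x t := by
            rw [hv1, hv2, pvF_succ m x t hne2, if_neg hx1, if_neg hxl]
          refine ⟨by rw [hv1, hv2], ?_⟩
          intro a b hne
          rcases pvGet2_pvSet2 (pvFMemo m x (t - 1) (pvFMemo m (x - 1) (t - 1) dp).2).2
              x.toNat t.toNat _ a b with hold | ⟨rfl, rfl, hv3⟩
          · rw [hold] at hne ⊢
            exact hg2 a b hne
          · rw [hv3, hr, hxc, htc]
            exact (pvF_fuel_irrel _ _ x t (by omega) ht).symm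

-- the summation loop threading dp computes the memo-free sum
theorem pv_loop_bridge (t : Int) (ht : 2 ≤ t) :
    ∀ (l : List Int) (s : Int) (dp : List (List Int)),
      (∀ i ∈ l, -(t - 2) ≤ i ∧ i ≤ t - 2) →
      (∀ a b : Nat, pvGet2 dp a b ≠ -1 →
          pvGet2 dp a b = pvF ((b : Int) - 2).toNat (a : Int) (b : Int)) →
      (l.foldl (fun sd i =>
          if PySem.Int.mod (i + t) 2 = 0 then
            let p := pvFMemo (t - 2).toNat (PySem.Int.floordiv (i + t) 2) t sd.2
            (pv_mod_add sd.1 (pv_mod_multiply i p.1), p.2)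
          else sd) (s, dp)).1
        = l.foldl (fun s i =>
          if PySem.Int.mod (i + t) 2 = 0 then
            pv_mod_add s (pv_mod_multiply i (pvF (t - 2).toNat (PySem.Int.floordiv (i + t) 2) t))
          else s) s := by
  have hnt : (((t - 2).toNat : Nat) : Int) = t - 2 := Int.toNat_of_nonneg (by omega)
  intro l
  induction l with
  | nil => intro s dp _ _; rfl
  | cons i l ihl =>
    intro s dp hmem hgood
    simp only [List.foldl_cons]
    by_cases hc : PySem.Int.mod (i + t) 2 = 0
    · rw [if_pos hc, if_pos hc]
      have hb := hmem i List.mem_cons_self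
      have hd : PySem.Int.floordiv (i + t) 2 = (i + t) / 2 :=
        PySem.Int.floordiv_eq_ediv_of_pos (by norm_num)
      obtain ⟨hv, hg⟩ := pvFMemo_spec (t - 2).toNat (PySem.Int.floordiv (i + t) 2) t dp
        (by omega) (by rw [hd]; omega) (by rw [hd]; omega) hgood
      simp only [hv]
      exact ihl _ _ (fun j hj => hmem j (List.mem_cons_of_mem i hj)) hg
    · rw [if_neg hc, if_neg hc]
      exact ihl s dp (fun j hj => hmem j (List.mem_cons_of_mem i hj)) hgood

theorem pvGet2_replicate (n m : Nat) (a b : Nat) :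
    pvGet2 (List.replicate n (List.replicate m (-1))) a b = -1 := by
  simp only [pvGet2, List.getD_eq_getElem?_getD, List.getElem?_replicate]
  split_ifs <;> simp

-- the initial table (all -1 except the three base cells) satisfies the memo invariant
theorem pv_init_good (t : Int) :
    ∀ a b : Nat,
      pvGet2 (pvSet2 (pvSet2 (pvSet2
          (List.replicate (t + 1).toNat (List.replicate (t + 1).toNat (-1))) 0 2 0) 1 2 1) 2 2 0) a b ≠ -1 →
      pvGet2 (pvSet2 (pvSet2 (pvSet2
          (List.replicate (t + 1).toNat (List.replicate (t + 1).toNat (-1))) 0 2 0) 1 2 1) 2 2 0) a b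
        = pvF ((b : Int) - 2).toNat (a : Int) (b : Int) := by
  intro a b hne
  rcases pvGet2_pvSet2 _ 2 2 0 a b with h3 | ⟨rfl, rfl, hv⟩
  · rw [h3] at hne ⊢
    rcases pvGet2_pvSet2 _ 1 2 1 a b with h2 | ⟨rfl, rfl, hv⟩
    · rw [h2] at hne ⊢
      rcases pvGet2_pvSet2 _ 0 2 0 a b with h1 | ⟨rfl, rfl, hv⟩
      · rw [h1] at hne ⊢
        rw [pvGet2_replicate] at hne
        exact absurd rfl hne
      · rw [hv]; decide
    · rw [hv]; decide
  · rw [hv]; decide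

theorem calc_eq_pure (t : Int) (ht : 2 ≤ t) : calc_expectation t = pvCalcPure t := by
  unfold calc_expectation pvCalcPure
  refine pv_loop_bridge t ht _ 0 _ (fun i hi => ?_) (pv_init_good t)
  have := (PySem.List.mem_pyRange_one).1 hi
  omega

-- ===== VERDICT (by name: the statement is the Claim_ definition above) =====
theorem calc_expectation_spec : Claim_equal_calc_expectation := by
  intro t _ hpre
  unfold Spec_calc_expectation calc_expectation_alt
  rw [calc_eq_pure t hpre]
  exact pvCalcPure_eq_zero t hpre

def calc_expectation_raises : Claim_raises_calc_expectation := by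
  unfold Claim_raises_calc_expectation
  exact ⟨fun t _ hr hp => by unfold Raises_calc_expectation at hr; unfold Pre_calc_expectation at hp; omega,
         by decide⟩
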